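-- pv_equiv track=rewrite | github.com/cobriensr/adventofcode2022 | day2/day2_puzzle2.py | find_correct_outcome
-- ===== SOURCE A (Python) =====
-- opponent_plays = {
--                     "A" : "Rock",
--                     "B" : "Paper",
--                     "C" : "Scissors"
--                 }
--
-- def find_correct_outcome(games:list) -> list:
--     """determine what the appropriate play is"""
--     results = []
--     for game in games:
--         if game[1] == "Y":
--             results.append([game[0], opponent_plays[game[0]]])
--         if game[1] == "X" and game[0] == "A":
--             results.append([game[0], opponent_plays["C"]])
--         if game[1] == "X" and game[0] == "B":
--             results.append([game[0], opponent_plays["A"]])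
--         if game[1] == "X" and game[0] == "C":
--             results.append([game[0], opponent_plays["B"]])
--         if game[1] == "Z" and game[0] == "A":
--             results.append([game[0], opponent_plays["B"]])
--         if game[1] == "Z" and game[0] == "B":
--             results.append([game[0], opponent_plays["C"]])
--         if game[1] == "Z" and game[0] == "C":
--             results.append([game[0], opponent_plays["A"]])
--     return results
-- ===== SOURCE B (Python) =====
-- plays = ["Rock", "Paper", "Scissors"]
--
-- def find_correct_outcome(games: list) -> list:
--     """determine what the appropriate play is"""
--     results = []
--     for game in games:
--         if game[1] in ("X", "Y", "Z") and game[0] in ("A", "B", "C"):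
--             offset = 0 if game[1] == "Y" else (-1 if game[1] == "X" else 1)
--             results.append([game[0], plays[(ord(game[0]) - 65 + offset) % 3]])
--     return results
-- ===== Notes on version B (the rewrite author's own statement) =====
-- stated objective: simpler
-- what changed: Replaces the dict plus seven per-case if-branches with a single membership guard and index arithmetic: plays[(ord(game[0]) - 65 + offset) % 3] with offset -1/0/1 for X/Y/Z.
import Mathlib
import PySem

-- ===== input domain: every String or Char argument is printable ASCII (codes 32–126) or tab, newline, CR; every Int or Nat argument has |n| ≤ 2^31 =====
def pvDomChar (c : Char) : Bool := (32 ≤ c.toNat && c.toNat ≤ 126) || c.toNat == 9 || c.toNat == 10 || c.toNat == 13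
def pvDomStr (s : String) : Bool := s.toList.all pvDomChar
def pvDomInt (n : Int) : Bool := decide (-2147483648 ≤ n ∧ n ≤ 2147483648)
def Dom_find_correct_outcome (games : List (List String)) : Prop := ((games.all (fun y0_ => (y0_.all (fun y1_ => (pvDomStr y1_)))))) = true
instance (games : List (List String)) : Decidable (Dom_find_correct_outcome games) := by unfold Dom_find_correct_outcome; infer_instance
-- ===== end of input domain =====

-- B replaces A's dict plus seven per-case if-branches by one membership guard and
-- index arithmetic into plays=["Rock","Paper","Scissors"]; objective: simpler.

-- ===== PORT A =====
def opponent_plays : PySem.Dict String String :=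
  PySem.Dict.ofList [("A", "Rock"), ("B", "Paper"), ("C", "Scissors")]

-- game[1] / game[0] are ported as PySem.List.pyGet? with default "": Pre_ guarantees the
-- indices are in range, and for the "Y" branch that the dict lookup succeeds
-- (Python raises IndexError / KeyError otherwise, and those inputs are outside Pre_).
def find_correct_outcome (games : List (List String)) : List (List String) :=
  games.foldl (fun results game =>
    let results := if (PySem.List.pyGet? game 1).getD "" == "Y" then
      results ++ [[(PySem.List.pyGet? game 0).getD "", opponent_plays.getD ((PySem.List.pyGet? game 0).getD "") ""]] else results
    let results := if (PySem.List.pyGet? game 1).getD "" == "X" && (PySem.List.pyGet? game 0).getD "" == "A" then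
      results ++ [[(PySem.List.pyGet? game 0).getD "", opponent_plays.getD "C" ""]] else results
    let results := if (PySem.List.pyGet? game 1).getD "" == "X" && (PySem.List.pyGet? game 0).getD "" == "B" then
      results ++ [[(PySem.List.pyGet? game 0).getD "", opponent_plays.getD "A" ""]] else results
    let results := if (PySem.List.pyGet? game 1).getD "" == "X" && (PySem.List.pyGet? game 0).getD "" == "C" then
      results ++ [[(PySem.List.pyGet? game 0).getD "", opponent_plays.getD "B" ""]] else results
    let results := if (PySem.List.pyGet? game 1).getD "" == "Z" && (PySem.List.pyGet? game 0).getD "" == "A" then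
      results ++ [[(PySem.List.pyGet? game 0).getD "", opponent_plays.getD "B" ""]] else results
    let results := if (PySem.List.pyGet? game 1).getD "" == "Z" && (PySem.List.pyGet? game 0).getD "" == "B" then
      results ++ [[(PySem.List.pyGet? game 0).getD "", opponent_plays.getD "C" ""]] else results
    let results := if (PySem.List.pyGet? game 1).getD "" == "Z" && (PySem.List.pyGet? game 0).getD "" == "C" then
      results ++ [[(PySem.List.pyGet? game 0).getD "", opponent_plays.getD "A" ""]] else results
    results) []

-- ===== PORT B =====
def pvPlays : List String := ["Rock", "Paper", "Scissors"]

def find_correct_outcome_alt (games : List (List String)) : List (List String) :=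
  games.foldl (fun results game =>
    if ((PySem.List.pyGet? game 1).getD "" == "X" || (PySem.List.pyGet? game 1).getD "" == "Y" || (PySem.List.pyGet? game 1).getD "" == "Z")
        && ((PySem.List.pyGet? game 0).getD "" == "A" || (PySem.List.pyGet? game 0).getD "" == "B" || (PySem.List.pyGet? game 0).getD "" == "C") then
      let offset : Int := if (PySem.List.pyGet? game 1).getD "" == "Y" then 0 else if (PySem.List.pyGet? game 1).getD "" == "X" then -1 else 1
      -- ord(game[0]) : the guard guarantees game[0] is a single letter, so headD is exact
      let i := PySem.Int.mod (((((PySem.List.pyGet? game 0).getD "").toList.headD ' ').toNat : Int) - 65 + offset) 3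
      results ++ [[(PySem.List.pyGet? game 0).getD "", (PySem.List.pyGet? pvPlays i).getD ""]]
    else results) []

-- ===== PRECONDITION & SPEC =====
-- Pre_ excludes exactly the inputs where A raises: a game shorter than two entries
-- (IndexError on game[1]) or a "Y" game whose first entry is not a dict key (KeyError).
def Pre_find_correct_outcome (games : List (List String)) : Prop :=
  ∀ game ∈ games, 2 ≤ game.length ∧
    ((PySem.List.pyGet? game 1).getD "" = "Y" →
      (PySem.List.pyGet? game 0).getD "" = "A" ∨ (PySem.List.pyGet? game 0).getD "" = "B" ∨
      (PySem.List.pyGet? game 0).getD "" = "C")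
instance (games : List (List String)) : Decidable (Pre_find_correct_outcome games) := by
  unfold Pre_find_correct_outcome; infer_instance

def pvWitness_find_correct_outcome : List (List String) :=
  [["A", "Y"], ["B", "X"], ["C", "Z"], ["Q", "W"]]

def Spec_find_correct_outcome (games : List (List String)) (out : List (List String)) : Prop := out = find_correct_outcome_alt games
instance (games : List (List String)) (out : List (List String)) : Decidable (Spec_find_correct_outcome games out) := by unfold Spec_find_correct_outcome; infer_instance

-- ===== CLAIM (what is proved, stated in full; the proofs are below) =====
def Claim_equal_find_correct_outcome : Prop := ∀ (games : List (List String)), Dom_find_correct_outcome games → Pre_find_correct_outcome games → Spec_find_correct_outcome games (find_correct_outcome games)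

-- ===== LEMMAS AND PROOFS =====

-- closed evaluations of the two lookup mechanisms on the six reachable letter/offset pairs
theorem opGetA : opponent_plays.getD "A" "" = "Rock" := by decide
theorem opGetB : opponent_plays.getD "B" "" = "Paper" := by decide
theorem opGetC : opponent_plays.getD "C" "" = "Scissors" := by decide
-- ===== VERDICT (by name: the statement is the Claim_ definition above) =====
theorem find_correct_outcome_spec : Claim_equal_find_correct_outcome := by
  intro games _ hpre
  show find_correct_outcome games = find_correct_outcome_alt games
  unfold find_correct_outcome find_correct_outcome_alt
  apply PySem.List.foldl_congr_mem'
  intro game hmem results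
  obtain ⟨hlen, hy⟩ := hpre game hmem
  revert hy
  generalize (PySem.List.pyGet? game 1).getD "" = g1
  generalize (PySem.List.pyGet? game 0).getD "" = g0
  intro hy
  by_cases h1y : g1 = "Y"
  · subst h1y
    rcases hy rfl with h | h | h <;> subst h <;>
      simp [opGetA, opGetB, opGetC, PySem.Int.mod, pvPlays, PySem.List.pyGet?, PySem.List.pyIdx?]
  · by_cases h0a : g0 = "A" <;> by_cases h0b : g0 = "B" <;> by_cases h0c : g0 = "C" <;>
      by_cases h1x : g1 = "X" <;> by_cases h1z : g1 = "Z" <;>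
      first
        | (subst_vars;
           simp [*, opGetA, opGetB, opGetC,
             PySem.Int.mod, pvPlays, PySem.List.pyGet?, PySem.List.pyIdx?];
           done)
        | (exfalso; simp_all)
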